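-- pv_equiv track=rewrite | github.com/tyyb4456/mediTwin-AI | agents/digital_twin/main.py | _determine_model_confidence
-- ===== SOURCE A (Python) =====
-- from typing import Optional, List, Dict, Tuple
--
-- def _determine_model_confidence(baseline_risks_with_ci: Dict[str, Dict]) -> str:
--     levels = [
--         baseline_risks_with_ci[k]["confidence_level"]
--         for k in ("readmission_30d", "mortality_30d", "complication")
--         if k in baseline_risks_with_ci
--     ]
--     if all(c == "HIGH" for c in levels):
--         return "HIGH"
--     if all(c in ("HIGH", "MODERATE") for c in levels):
--         return "MODERATE"
--     return "LOW"
-- ===== SOURCE B (Python) =====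
-- def _determine_model_confidence(baseline_risks_with_ci):
--     rank = {"HIGH": 2, "MODERATE": 1}
--     worst = 2
--     for k in ("readmission_30d", "mortality_30d", "complication"):
--         if k in baseline_risks_with_ci:
--             worst = min(worst, rank.get(baseline_risks_with_ci[k]["confidence_level"], 0))
--     return ("LOW", "MODERATE", "HIGH")[worst]
-- ===== Notes on version B (the rewrite author's own statement) =====
-- stated objective: simpler
-- what changed: Replaces the levels-list construction plus two separate all() passes with a single fold over the three keys that keeps the minimum severity rank (HIGH=2, MODERATE=1, other=0, default 2) and indexes the answer from that rank.
import Mathlib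
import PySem

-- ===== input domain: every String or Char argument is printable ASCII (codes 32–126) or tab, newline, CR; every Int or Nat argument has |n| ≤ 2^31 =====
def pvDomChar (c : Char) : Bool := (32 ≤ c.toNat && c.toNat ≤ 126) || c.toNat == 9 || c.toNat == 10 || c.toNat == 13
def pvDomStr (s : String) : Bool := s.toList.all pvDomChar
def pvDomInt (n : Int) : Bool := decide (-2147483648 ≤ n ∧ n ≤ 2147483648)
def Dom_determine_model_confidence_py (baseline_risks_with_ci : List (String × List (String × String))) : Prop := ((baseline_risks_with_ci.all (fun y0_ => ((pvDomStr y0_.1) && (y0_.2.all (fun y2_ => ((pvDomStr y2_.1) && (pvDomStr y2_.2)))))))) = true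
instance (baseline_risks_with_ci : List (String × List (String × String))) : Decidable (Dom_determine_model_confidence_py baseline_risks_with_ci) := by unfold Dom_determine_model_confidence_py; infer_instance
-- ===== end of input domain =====

-- B replaces the levels list and A's two all() passes with one minimum-severity-rank fold (objective: simpler).

-- first-match association-list lookup (Python dict indexing / `in` under the type convention)
def pvLookup? {ν : Type} (d : List (String × ν)) (k : String) : Option ν :=
  (d.find? (fun p => p.1 == k)).map (·.2)

def pvKeys3 : List String := ["readmission_30d", "mortality_30d", "complication"]

-- ===== PORT A =====
def determine_model_confidence_py (baseline_risks_with_ci : List (String × List (String × String))) : String :=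
  let levels : List String :=
    pvKeys3.filterMap (fun k =>
      (pvLookup? baseline_risks_with_ci k).map (fun inner => (pvLookup? inner "confidence_level").getD ""))
  if levels.all (fun c => c == "HIGH") then "HIGH"
  else if levels.all (fun c => c == "HIGH" || c == "MODERATE") then "MODERATE"
  else "LOW"

-- ===== PORT B =====
def pvRank (c : String) : Nat := if c == "HIGH" then 2 else if c == "MODERATE" then 1 else 0

def determine_model_confidence_py_alt (baseline_risks_with_ci : List (String × List (String × String))) : String :=
  let worst : Nat := pvKeys3.foldl (fun w k =>
    match pvLookup? baseline_risks_with_ci k with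
    | some inner => min w (pvRank ((pvLookup? inner "confidence_level").getD ""))
    | none => w) 2
  ["LOW", "MODERATE", "HIGH"].getD worst "LOW"

-- ===== PRECONDITION & SPEC =====
-- Pre_ excludes exactly the inputs where the inner dict of a present key lacks "confidence_level":
-- there Python A (and Python B) raise KeyError.
def Pre_determine_model_confidence_py (baseline_risks_with_ci : List (String × List (String × String))) : Prop :=
  (pvKeys3.all (fun k =>
    match pvLookup? baseline_risks_with_ci k with
    | some inner => (pvLookup? inner "confidence_level").isSome
    | none => true)) = true

instance (baseline_risks_with_ci : List (String × List (String × String))) : Decidable (Pre_determine_model_confidence_py baseline_risks_with_ci) := by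
  unfold Pre_determine_model_confidence_py; infer_instance

def pvWitness_determine_model_confidence_py : (List (String × List (String × String))) :=
  [("readmission_30d", [("confidence_level", "HIGH")])]

def Spec_determine_model_confidence_py (baseline_risks_with_ci : List (String × List (String × String))) (out : String) : Prop := out = determine_model_confidence_py_alt baseline_risks_with_ci
instance (baseline_risks_with_ci : List (String × List (String × String))) (out : String) : Decidable (Spec_determine_model_confidence_py baseline_risks_with_ci out) := by unfold Spec_determine_model_confidence_py; infer_instance

-- ===== CLAIM (what is proved, stated in full; the proofs are below) =====
def Claim_equal_determine_model_confidence_py : Prop := ∀ (baseline_risks_with_ci : List (String × List (String × String))), Dom_determine_model_confidence_py baseline_risks_with_ci → Pre_determine_model_confidence_py baseline_risks_with_ci → Spec_determine_model_confidence_py baseline_risks_with_ci (determine_model_confidence_py baseline_risks_with_ci)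

-- ===== LEMMAS AND PROOFS =====

-- the worst-rank fold of B, as a function of the extracted levels list
def pvWorst (ls : List String) : Nat := ls.foldl (fun w c => min w (pvRank c)) 2

lemma pvWorst_foldl (ls : List String) (w : Nat) (hw : w ≤ 2) :
    ls.foldl (fun w c => min w (pvRank c)) w = min w (pvWorst ls) := by
  induction ls generalizing w with
  | nil => simp [pvWorst]; omega
  | cons c ls ih =>
    have h2 : pvRank c ≤ 2 := by unfold pvRank; split_ifs <;> omega
    simp only [pvWorst, List.foldl_cons] at *
    rw [ih _ (by omega), ih (min 2 (pvRank c)) (by omega)]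
    omega

lemma pvWorst_le (ls : List String) : pvWorst ls ≤ 2 := by
  unfold pvWorst
  rw [pvWorst_foldl ls 2 le_rfl]; omega

lemma pvKey (ls : List String) :
    (if ls.all (fun c => c == "HIGH") then "HIGH"
     else if ls.all (fun c => c == "HIGH" || c == "MODERATE") then "MODERATE"
     else "LOW")
    = ["LOW", "MODERATE", "HIGH"].getD (pvWorst ls) "LOW" := by
  induction ls with
  | nil => simp [pvWorst]
  | cons c ls ih =>
    have hW := pvWorst_le ls
    have hr2 : pvRank c ≤ 2 := by unfold pvRank; split_ifs <;> omega
    have hw : pvWorst (c :: ls) = min (pvRank c) (pvWorst ls) := by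
      have h := pvWorst_foldl ls (min 2 (pvRank c)) (by omega)
      unfold pvWorst at *
      simp only [List.foldl_cons]
      omega
    rw [hw]
    by_cases hH : c = "HIGH"
    · have : pvRank c = 2 := by simp [pvRank, hH]
      rw [this]
      have : min 2 (pvWorst ls) = pvWorst ls := by omega
      rw [this]
      simpa [hH] using ih
    · by_cases hM : c = "MODERATE"
      · have : pvRank c = 1 := by simp [pvRank, hM]
        rw [this]
        simp only [List.all_cons]
        have e1 : (c == "HIGH") = false := by simp [hH]
        have e2 : (c == "MODERATE") = true := by simp [hM]
        simp only [e1, e2]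
        simp only [Bool.false_and, Bool.false_or, Bool.true_and, Bool.false_eq_true, if_false]
        -- relate the remaining all-conditions to pvWorst ls via ih
        rcases Nat.lt_or_ge (pvWorst ls) 1 with h | h
        · -- pvWorst ls = 0 : ih says both all's on ls are false-ish result LOW
          interval_cases h' : pvWorst ls
          · have := ih
            by_cases ha : (ls.all (fun c => c == "HIGH")) = true
            · simp [ha] at this
            · by_cases hb : (ls.all (fun c => c == "HIGH" || c == "MODERATE")) = true
              · simp [ha, hb] at this
              · simp [Bool.eq_false_iff.mpr hb]
        · have hmin : min 1 (pvWorst ls) = 1 := by omega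
          rw [hmin]
          rcases Nat.lt_or_ge (pvWorst ls) 2 with h2' | h2'
          · have h1' : pvWorst ls = 1 := by omega
            have := ih
            simp only [h1'] at this
            by_cases ha : (ls.all (fun c => c == "HIGH")) = true
            · simp [ha] at this
            · by_cases hb : (ls.all (fun c => c == "HIGH" || c == "MODERATE")) = true
              · simp [hb]
              · simp [ha, Bool.eq_false_iff.mpr hb] at this
          · have h2'' : pvWorst ls = 2 := by omega
            have := ih
            simp only [h2''] at this
            by_cases ha : (ls.all (fun c => c == "HIGH")) = true
            · have hb : (ls.all (fun c => c == "HIGH" || c == "MODERATE")) = true := by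
                rw [List.all_eq_true] at ha ⊢
                intro x hx
                simp [ha x hx]
              simp [hb]
            · exfalso
              rw [if_neg ha] at this
              split_ifs at this <;> simp at this
      · have hr : pvRank c = 0 := by simp [pvRank, hH, hM]
        rw [hr]
        have hmin : min 0 (pvWorst ls) = 0 := by omega
        rw [hmin]
        have h1 : ((c : String) == "HIGH") = false := by
          simp [hH]
        have h2 : ((c : String) == "MODERATE") = false := by
          simp [hM]
        simp [h1, h2]

theorem determine_model_confidence_py_spec : Claim_equal_determine_model_confidence_py := by
  intro d _hDom _hPre
  unfold Spec_determine_model_confidence_py determine_model_confidence_py determine_model_confidence_py_alt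
  simp only [pvKeys3]
  -- case on the three lookups; both sides reduce to expressions over the same level strings
  cases h1 : pvLookup? d "readmission_30d" <;>
  cases h2 : pvLookup? d "mortality_30d" <;>
  cases h3 : pvLookup? d "complication" <;>
    simp only [List.filterMap_cons, List.filterMap_nil, List.foldl_cons, List.foldl_nil,
      h1, h2, h3, Option.map_some, Option.map_none] <;>
    · rw [pvKey]
      simp [pvWorst]
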